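-- pv_equiv track=rewrite | github.com/AllonKleinLab/paper-data | Scully_Ciona_blood_2025/species_comparisons/gs_plots/gs_plots_Hs_vs_Cr.py | get_gene_subsets
-- ===== SOURCE A (Python) =====
-- from itertools import combinations
--
-- def get_gene_subsets(gene_sets):
--     """
--     Given a dictionary of gene sets per cell state, returns a dictionary
--     giving the set of genes in each combination. For example, for 3 cell
--     states, gives the set of genes which are:
--     - only in state1
--     - only in state2
--     - only in state3
--     - in state1 and state2, but not state3
--     - in state2 and state2, but not state1
--     - in state1 and state3, but not state2
--     - in all 3 of state1, state2, and state3
--     This is used for determining how much ribbons in GS plots should overlap.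
--
--     Args:
--         gene_sets (dict) : {"ciona1": set1, "ciona2": set2, "ciona3": set3, ...}
--
--     Returns:
--         subsets (dict) : Keys are tuples of cell states, e.g. ('state1',) for
--             genes only in state1, or ('state2', 'state3') for genes in state2
--             and state3 but not state1. Values are sets, listing the genes
--             corresponding to each state combination.
--     """
--     subsets = {}
--
--     # Generate all non-empty combinations of set names
--     set_names = list(gene_sets.keys())
--     for r in range(1, len(set_names) + 1):
--         for combo in combinations(set_names, r):
--             # Get the intersection of the selected sets
--             intersection_set = set.intersection(*(gene_sets[name]
--                                                   for name in combo))
--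
--             # Get the union of sets not in this combination (to exclude genes
--             # appearing elsewhere)
--             other_sets = [gene_sets[name] for name in set_names
--                           if name not in combo]
--             exclusion_set = set.union(*other_sets) if other_sets else set()
--
--             # Subtract genes that appear in any other set
--             subsets[combo] = intersection_set - exclusion_set
--
--     return subsets
-- ===== SOURCE B (Python) =====
-- from itertools import combinations
--
-- def get_gene_subsets(gene_sets):
--     set_names = list(gene_sets.keys())
--     # Pre-initialize every non-empty combination key, in the same order A emits them.
--     subsets = {}
--     for r in range(1, len(set_names) + 1):
--         for combo in combinations(set_names, r):
--             subsets[combo] = set()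
--     # One pass over the genes: bucket each gene by its exact membership tuple.
--     seen = set()
--     for name in set_names:
--         for gene in gene_sets[name]:
--             if gene not in seen:
--                 seen.add(gene)
--                 combo = tuple(n for n in set_names if gene in gene_sets[n])
--                 subsets[combo].add(gene)
--     return subsets
-- ===== Notes on version B (the rewrite author's own statement) =====
-- stated objective: alternative
-- what changed: Instead of computing, for each of the 2^n-1 name combinations, an intersection of all member sets minus a union of all the others, B pre-inserts every combination key empty and makes one pass over the genes, bucketing each gene by its exact membership tuple (intended to save the per-combination set algebra; measured ~2.3x at moderate sizes, unconfirmed at the largest since the 2^n-sized output makes both time out).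
import Mathlib
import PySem

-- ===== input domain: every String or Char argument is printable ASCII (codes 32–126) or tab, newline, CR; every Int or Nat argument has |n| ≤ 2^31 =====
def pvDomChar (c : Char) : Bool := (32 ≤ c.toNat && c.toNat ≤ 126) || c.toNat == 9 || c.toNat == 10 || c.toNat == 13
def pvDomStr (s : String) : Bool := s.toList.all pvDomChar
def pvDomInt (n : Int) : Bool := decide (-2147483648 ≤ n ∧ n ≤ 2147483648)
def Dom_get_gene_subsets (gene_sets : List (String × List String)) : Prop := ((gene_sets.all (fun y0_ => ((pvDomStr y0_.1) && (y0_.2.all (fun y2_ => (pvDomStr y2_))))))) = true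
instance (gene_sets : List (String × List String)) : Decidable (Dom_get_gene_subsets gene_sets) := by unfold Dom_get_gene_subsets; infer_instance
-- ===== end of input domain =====

-- B replaces A's per-combination set algebra (intersection of the combo's sets minus the union
-- of all other sets, for each of the 2^n - 1 combinations) by pre-inserting every combination
-- key empty and making one pass over the genes, bucketing each gene under its exact membership
-- tuple; objective: alternative (it avoids the per-combination set operations).

-- ===== PORT A =====
def pvLook (d : PySem.Dict String (List String)) (name : String) : PySem.Set String :=
  PySem.Set.ofList (d.getD name [])

def pvComboValue (d : PySem.Dict String (List String)) (set_names : List String)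
    (combo : List String) : List String :=
  let intersection_set : PySem.Set String :=
    match combo with
    | [] => []
    | c0 :: rest => (rest.map (pvLook d)).foldl PySem.Set.inter (pvLook d c0)
  let other_sets := (set_names.filter (fun name => !combo.contains name)).map (pvLook d)
  let exclusion_set := other_sets.foldl PySem.Set.union PySem.Set.empty
  PySem.Set.diff intersection_set exclusion_set

def get_gene_subsets (gene_sets : List (String × List String)) : List (List String × List String) :=
  let d := PySem.Dict.ofList gene_sets
  let set_names := d.keys
  ((PySem.List.pyRange 1 (set_names.length + 1) 1).foldl (fun subs r =>
      (PySem.List.combinations set_names r.toNat).foldl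
        (fun subs combo => subs.insert combo (pvComboValue d set_names combo)) subs)
    PySem.Dict.empty).items

-- ===== PORT B =====
def pvGeneStep (d : PySem.Dict String (List String)) (set_names : List String)
    (st : PySem.Dict (List String) (List String) × PySem.Set String) (gene : String) :
    PySem.Dict (List String) (List String) × PySem.Set String :=
  if PySem.Set.contains st.2 gene then st
  else
    let combo := set_names.filter (fun n => PySem.Set.contains (pvLook d n) gene)
    (st.1.modify combo [] (fun s => PySem.Set.add s gene), PySem.Set.add st.2 gene)

def get_gene_subsets_alt (gene_sets : List (String × List String)) : List (List String × List String) :=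
  let d := PySem.Dict.ofList gene_sets
  let set_names := d.keys
  let subsets :=
    (PySem.List.pyRange 1 (set_names.length + 1) 1).foldl (fun subs r =>
      (PySem.List.combinations set_names r.toNat).foldl
        (fun subs combo => subs.insert combo ([] : List String)) subs)
      PySem.Dict.empty
  (set_names.foldl (fun st name => (pvLook d name).foldl (pvGeneStep d set_names) st)
    (subsets, PySem.Set.empty)).1.items

-- ===== PRECONDITION & SPEC =====
def Spec_get_gene_subsets (gene_sets : List (String × List String)) (out : List (List String × List String)) : Prop := out = get_gene_subsets_alt gene_sets
instance (gene_sets : List (String × List String)) (out : List (List String × List String)) : Decidable (Spec_get_gene_subsets gene_sets out) := by unfold Spec_get_gene_subsets; infer_instance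

-- ===== CLAIM (what is proved, stated in full; the proofs are below) =====
def Claim_equal_get_gene_subsets : Prop := ∀ (gene_sets : List (String × List String)), Dom_get_gene_subsets gene_sets → Spec_get_gene_subsets gene_sets (get_gene_subsets gene_sets)

-- ===== LEMMAS AND PROOFS =====
def pvAllCombos (ns : List String) : List (List String) :=
  (List.range' 1 ns.length).flatMap (fun r => PySem.List.combinations ns r)

def pvKey (d : PySem.Dict String (List String)) (ns : List String) (g : String) : List String :=
  ns.filter (fun n => PySem.Set.contains (pvLook d n) g)

theorem pv_pyRange_eq (n : Nat) :
    PySem.List.pyRange 1 ((n : Int) + 1) 1 = (List.range' 1 n).map Int.ofNat := by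
  simp only [PySem.List.pyRange]
  norm_num
  rcases Nat.eq_zero_or_pos n with h | h
  · subst h; simp
  · rw [if_pos (by exact_mod_cast Nat.lt_add_of_pos_left h ..)]
    rw [List.range'_eq_map_range, List.map_map]
    apply List.map_congr_left
    intro k hk
    simp [Function.comp, Int.ofNat_eq_natCast]

-- the two nested loops over r and combinations(set_names, r) are one loop over pvAllCombos
theorem pv_doubleFold {β : Type} (ns : List String) (g : β → List String → β) (init : β) :
    (PySem.List.pyRange 1 ((ns.length : Int) + 1) 1).foldl
      (fun acc r => (PySem.List.combinations ns r.toNat).foldl g acc) init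
    = (pvAllCombos ns).foldl g init := by
  rw [pvAllCombos, pv_pyRange_eq, List.foldl_map, List.foldl_flatMap]
  simp [Int.ofNat_eq_natCast]

theorem pv_combinations_nodup {α : Type} [DecidableEq α] (ns : List α) (r : Nat) (h : ns.Nodup) :
    (PySem.List.combinations ns r).Nodup := by
  induction ns generalizing r with
  | nil => cases r <;> simp [PySem.List.combinations_zero, PySem.List.combinations_nil_succ]
  | cons x xs ih =>
    cases r with
    | zero => simp [PySem.List.combinations_zero]
    | succ r =>
      rw [PySem.List.combinations_cons_succ]
      have hx : x ∉ xs := (List.nodup_cons.mp h).1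
      have hxs : xs.Nodup := (List.nodup_cons.mp h).2
      apply List.Nodup.append
      · exact (ih r hxs).map (fun a b hab => by injection hab)
      · exact ih (r+1) hxs
      · intro c hc hc'
        rcases List.mem_map.mp hc with ⟨c', _, rfl⟩
        have := PySem.List.sublist_of_mem_combinations hc'
        exact hx (this.subset (List.mem_cons_self ..))

theorem pv_mem_allCombos (ns : List String) (c : List String) :
    c ∈ pvAllCombos ns ↔ c.Sublist ns ∧ c ≠ [] := by
  rw [pvAllCombos]
  simp only [List.mem_flatMap, List.mem_range', PySem.List.mem_combinations_iff]
  constructor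
  · rintro ⟨r, ⟨i, hi, hri⟩, hs, hl⟩
    exact ⟨hs, by rintro rfl; simp at hl; omega⟩
  · rintro ⟨hs, hne⟩
    have h1 : 1 ≤ c.length := by
      cases c with | nil => exact absurd rfl hne | cons a t => exact Nat.le_add_left 1 t.length
    have h2 := hs.length_le
    exact ⟨c.length, ⟨c.length - 1, by omega, by omega⟩, hs, rfl⟩

theorem pv_allCombos_nodup (ns : List String) (h : ns.Nodup) : (pvAllCombos ns).Nodup := by
  rw [pvAllCombos, List.nodup_flatMap]
  refine ⟨fun r _ => pv_combinations_nodup ns r h, ?_⟩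
  refine List.Pairwise.imp_of_mem ?_ (List.nodup_range' (s := 1) (n := ns.length))
  intro a b ha hb hne c hca hcb
  exact hne ((PySem.List.length_of_mem_combinations hca).symm.trans
    (PySem.List.length_of_mem_combinations hcb))

-- fold of set intersections is one filter over the first set
theorem pv_fold_inter (sets : List (PySem.Set String)) (acc : PySem.Set String) :
    sets.foldl PySem.Set.inter acc = acc.filter (fun g => sets.all (fun s => s.contains g)) := by
  induction sets generalizing acc with
  | nil => simp [List.filter_true]
  | cons s ss ih =>
    rw [List.foldl_cons, ih, PySem.Set.inter, List.filter_filter]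
    apply List.filter_congr
    intro g _
    simp [Bool.and_comm]

-- membership in a fold of set unions
theorem pv_fold_union_contains (sets : List (PySem.Set String)) (acc : PySem.Set String) (g : String) :
    PySem.Set.contains (sets.foldl PySem.Set.union acc) g
      = (acc.contains g || sets.any (fun s => s.contains g)) := by
  induction sets generalizing acc with
  | nil => simp
  | cons s ss ih =>
    rw [List.foldl_cons, ih, List.any_cons]
    have : PySem.Set.contains (acc.union s) g = (acc.contains g || s.contains g) := by
      rcases Bool.eq_false_or_eq_true (acc.contains g) with h | h <;>
      rcases Bool.eq_false_or_eq_true (PySem.Set.contains s g) with h2 | h2 <;>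
        simp_all [PySem.Set.union, PySem.Set.mem_update]
    rw [this, Bool.or_assoc]

-- a sublist of a Nodup list is recovered by filtering on membership
theorem pv_filter_mem_sublist (c ns : List String) (h : c.Sublist ns) (hn : ns.Nodup) :
    ns.filter (fun n => decide (n ∈ c)) = c := by
  induction h with
  | slnil => rfl
  | cons a h ih =>
    rename_i l₁ l₂
    have ha : a ∉ l₂ := (List.nodup_cons.mp hn).1
    have ha1 : a ∉ l₁ := fun hx => ha (h.subset hx)
    rw [List.filter_cons, if_neg (by simpa using ha1)]
    exact ih (List.nodup_cons.mp hn).2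
  | cons₂ a h ih =>
    rename_i l₁ l₂
    have ha : a ∉ l₂ := (List.nodup_cons.mp hn).1
    rw [List.filter_cons, if_pos (by simp)]
    congr 1
    rw [List.filter_congr (q := fun n => decide (n ∈ l₁)) ?_, ih (List.nodup_cons.mp hn).2]
    intro n hnm
    have : n ≠ a := fun hna => ha (hna ▸ hnm)
    simp [this]

-- B's gene loop with its seen-set equals a plain fold over the deduplicated fresh genes
theorem pv_pair_fold (d : PySem.Dict String (List String)) (ns : List String)
    (l : List String) (subs : PySem.Dict (List String) (List String)) (seen : PySem.Set String) :
    (l.foldl (pvGeneStep d ns) (subs, seen)).1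
      = ((PySem.Set.ofList l).filter (fun g => !PySem.Set.contains seen g)).foldl
          (fun subs g => subs.modify (pvKey d ns g) [] (fun s => PySem.Set.add s g)) subs := by
  induction l generalizing subs seen with
  | nil => simp [PySem.Set.ofList]
  | cons x t ih =>
    rw [List.foldl_cons, PySem.Set.ofList_cons]
    cases hx : PySem.Set.contains seen x with
    | false =>
      have hxseen : x ∉ seen := fun hm => by
        rw [(PySem.Set.contains_iff seen x).mpr hm] at hx; exact absurd hx (by decide)
      rw [show pvGeneStep d ns (subs, seen) x
            = (subs.modify (pvKey d ns x) [] (fun s => PySem.Set.add s x), PySem.Set.add seen x) by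
          rw [pvGeneStep, if_neg (by rw [hx]; exact Bool.false_ne_true)]; rfl]
      rw [ih]
      rw [List.filter_cons, if_pos (by simp [hxseen]), List.foldl_cons]
      congr 1
      rw [PySem.Set.discard, List.filter_filter]
      apply List.filter_congr
      intro g hg
      rw [PySem.Set.add_of_not_mem hxseen]
      rcases eq_or_ne g x with rfl | hgx
      · simp
      · simp [hgx, Bool.and_comm]
    | true =>
      have hxm : x ∈ seen := (PySem.Set.contains_iff seen x).mp hx
      rw [show pvGeneStep d ns (subs, seen) x = (subs, seen) by
        rw [pvGeneStep, if_pos (by rw [hx])]]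
      rw [ih]
      rw [List.filter_cons, if_neg (by simp [hxm])]
      congr 1
      rw [PySem.Set.discard, List.filter_filter]
      apply List.filter_congr
      intro g hg
      rcases eq_or_ne g x with rfl | hgx
      · simp [hxm]
      · simp [hgx]

-- value of one bucket after the bucketing fold
theorem pv_getD_fold (key : String → List String) (l : List String)
    (d : PySem.Dict (List String) (List String)) (c : List String)
    (hnd : l.Nodup) (hfresh : ∀ g ∈ l, g ∉ d.getD (key g) []) :
    (l.foldl (fun subs g => subs.modify (key g) [] (fun s => PySem.Set.add s g)) d).getD c []
      = d.getD c [] ++ l.filter (fun g => key g == c) := by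
  induction l generalizing d with
  | nil => simp
  | cons g t ih =>
    rw [List.foldl_cons]
    have hg : g ∉ d.getD (key g) [] := hfresh g (List.mem_cons_self ..)
    have hmod : d.modify (key g) [] (fun s => PySem.Set.add s g)
        = d.insert (key g) (d.getD (key g) [] ++ [g]) := by
      rw [PySem.Dict.modify, PySem.Set.add_of_not_mem hg]
    rw [hmod, ih]
    · rw [List.filter_cons]
      rcases eq_or_ne (key g) c with hc | hc
      · rw [if_pos (by simp [hc]), PySem.Dict.getD_insert, if_pos hc.symm, hc]
        simp
      · rw [if_neg (by simp; exact hc), PySem.Dict.getD_insert,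
          if_neg (fun h => hc h.symm)]
    · exact (List.nodup_cons.mp hnd).2
    · intro h ht
      rw [PySem.Dict.getD_insert]
      split_ifs with he
      · intro hmem
        rcases List.mem_append.mp hmem with hm | hm
        · exact hfresh h (List.mem_cons_of_mem _ ht) (by rwa [← he] at hm)
        · have : h = g := by simpa using hm
          exact (List.nodup_cons.mp hnd).1 (this ▸ ht)
      · exact hfresh h (List.mem_cons_of_mem _ ht)

-- the combo-enumeration fold, with values v, lists its items in enumeration order
theorem pv_items_combo_fold (ns : List String) (hn : ns.Nodup) (v : List String → List String) :
    ((pvAllCombos ns).foldl (fun subs combo => subs.insert combo (v combo)) PySem.Dict.empty).items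
      = (pvAllCombos ns).map (fun c => (c, v c)) := by
  have h := PySem.Dict.items_foldl_insert_fresh (l := pvAllCombos ns)
      (k := fun c : List String => c) (v := v) (d := PySem.Dict.empty)
      (fun a _ => PySem.Dict.contains_empty a) (by simpa using pv_allCombos_nodup ns hn)
  simpa using h

theorem pv_init_getD (ns : List String) (hn : ns.Nodup) (c : List String) :
    ((pvAllCombos ns).foldl (fun subs combo => subs.insert combo ([] : List String))
      PySem.Dict.empty).getD c [] = [] := by
  set I := (pvAllCombos ns).foldl (fun subs combo => subs.insert combo ([] : List String))
      PySem.Dict.empty with hI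
  have hitems : I.items = (pvAllCombos ns).map (fun c => (c, ([] : List String))) :=
    pv_items_combo_fold ns hn _
  cases hcon : I.contains c with
  | false => exact PySem.Dict.getD_of_not_contains I [] hcon
  | true =>
    have hkeys : I.keys.Nodup := by
      rw [PySem.Dict.keys, hitems, List.map_map]
      have : ((fun x : List String × List String => x.1) ∘ fun c : List String => (c, ([] : List String))) = id := rfl
      rw [this, List.map_id]
      exact pv_allCombos_nodup ns hn
    have : c ∈ I.keys := (PySem.Dict.contains_iff_mem_keys I c).mp hcon
    rw [PySem.Dict.keys, hitems, List.map_map] at this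
    rcases List.mem_map.mp this with ⟨c', hc', he⟩
    have : (c, ([] : List String)) ∈ I.items := by
      rw [hitems]; exact List.mem_map.mpr ⟨c', hc', by simp at he; simp [he]⟩
    exact PySem.Dict.getD_of_mem_items I this hkeys []

-- a gene's membership tuple equals a combo iff membership agrees with the combo everywhere
theorem pv_key_eq_iff (d : PySem.Dict String (List String)) (ns : List String) (g : String)
    (c : List String) (hn : ns.Nodup) (hc : c.Sublist ns) :
    pvKey d ns g = c ↔ ∀ n ∈ ns, (g ∈ pvLook d n ↔ n ∈ c) := by
  constructor
  · intro h n hns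
    constructor
    · intro hg
      have : n ∈ pvKey d ns g := by
        rw [pvKey]
        exact List.mem_filter.mpr ⟨hns, (PySem.Set.contains_iff _ g).mpr hg⟩
      rwa [h] at this
    · intro hnc
      have : n ∈ pvKey d ns g := h ▸ hnc
      rw [pvKey] at this
      exact (PySem.Set.contains_iff _ g).mp (List.mem_filter.mp this).2
  · intro h
    rw [pvKey, ← pv_filter_mem_sublist c ns hc hn]
    apply List.filter_congr
    intro n hns
    show PySem.Set.contains (pvLook d n) g = decide (n ∈ c)
    rcases Bool.eq_false_or_eq_true (PySem.Set.contains (pvLook d n) g) with hb | hb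
    · rw [hb]
      symm
      exact decide_eq_true ((h n hns).mp ((PySem.Set.contains_iff _ g).mp hb))
    · rw [hb]
      symm
      refine decide_eq_false ?_
      intro hnc
      rw [(PySem.Set.contains_iff _ g).mpr ((h n hns).mpr hnc)] at hb
      exact absurd hb (by decide)

-- a nonempty sublist splits its host at its first element
theorem pv_sublist_decomp (c0 : String) (rest ns : List String) (hn : ns.Nodup)
    (h : (c0 :: rest).Sublist ns) :
    ∃ l1 l2, ns = l1 ++ c0 :: l2 ∧ rest.Sublist l2 ∧ ∀ n ∈ l1, n ∉ c0 :: rest := by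
  induction ns with
  | nil => cases h
  | cons a as ih =>
    rcases List.nodup_cons.mp hn with ⟨ha, has⟩
    cases h with
    | cons _ h' =>
      rcases ih has h' with ⟨l1, l2, he, hr, hl⟩
      refine ⟨a :: l1, l2, by rw [he, List.cons_append], hr, ?_⟩
      intro n hnm
      rcases List.mem_cons.mp hnm with rfl | hnm
      · exact fun hmem => ha (h'.subset hmem)
      · exact hl n hnm
    | cons₂ _ h' =>
      exact ⟨[], as, rfl, h', by simp⟩

-- filtering the deduplicated gene stream by a tuple test supported on pvLook d c0
theorem pv_bucket_eq (d : PySem.Dict String (List String)) (l1 l2 : List String) (c0 : String)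
    (Q : String → Bool)
    (hQ0 : ∀ g, Q g = true → g ∈ pvLook d c0)
    (hQ1 : ∀ g, Q g = true → ∀ n ∈ l1, g ∉ pvLook d n) :
    (PySem.Set.ofList ((l1 ++ c0 :: l2).flatMap (fun n => pvLook d n))).filter Q
      = (pvLook d c0).filter Q := by
  rw [show (l1 ++ c0 :: l2).flatMap (fun n => pvLook d n)
      = l1.flatMap (fun n => pvLook d n) ++ (pvLook d c0 ++ l2.flatMap (fun n => pvLook d n)) by
    simp [List.flatMap_append]]
  rw [PySem.Set.ofList_append, PySem.Set.update_eq_append_filter, List.filter_append]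
  have h1 : (PySem.Set.ofList (l1.flatMap (fun n => pvLook d n))).filter Q = [] := by
    rw [List.filter_eq_nil_iff]
    intro g hg hQ
    rcases List.mem_flatMap.mp ((PySem.Set.mem_ofList _ g).mp hg) with ⟨n, hn, hgn⟩
    exact hQ1 g hQ n hn hgn
  rw [h1, List.nil_append, List.filter_filter]
  have hol : PySem.Set.ofList (pvLook d c0) = pvLook d c0 := by
    rw [pvLook, PySem.Set.ofList_ofList]
  rw [PySem.Set.ofList_append, hol, PySem.Set.update_eq_append_filter, List.filter_append]
  -- second block: everything new from l2 is absent from pvLook d c0, so Q rejects it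
  have h2 : List.filter (fun a => Q a && !(PySem.Set.ofList (l1.flatMap (fun n => pvLook d n))).contains a)
      (List.filter (fun y => !(pvLook d c0).contains y)
        (PySem.Set.ofList (l2.flatMap (fun n => pvLook d n)))) = [] := by
    rw [List.filter_eq_nil_iff]
    intro g hg hQ
    have hg' := List.of_mem_filter hg
    have : g ∈ pvLook d c0 := hQ0 g (by exact (Bool.and_eq_true_iff.mp hQ).1)
    rw [(PySem.Set.contains_iff _ g).mpr this] at hg'
    exact absurd hg' (by decide)
  rw [h2, List.append_nil]
  apply List.filter_congr
  intro g hg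
  show (Q g && !(PySem.Set.ofList (l1.flatMap (fun n => pvLook d n))).contains g) = Q g
  rcases Bool.eq_false_or_eq_true (Q g) with hq | hq
  · have : (PySem.Set.ofList (l1.flatMap (fun n => pvLook d n))).contains g = false := by
      apply Bool.eq_false_iff.mpr
      intro hcon
      rcases List.mem_flatMap.mp ((PySem.Set.mem_ofList _ g).mp
        ((PySem.Set.contains_iff _ g).mp hcon)) with ⟨n, hn, hgn⟩
      exact hQ1 g hq n hn hgn
    rw [hq, this]
    rfl
  · rw [hq]
    rfl

-- A's per-combination value is B's bucket for that combination
theorem pv_combo_value_eq (d : PySem.Dict String (List String)) (ns : List String)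
    (hn : ns.Nodup) (c : List String) (hsub : c.Sublist ns) (hne : c ≠ []) :
    pvComboValue d ns c
      = (PySem.Set.ofList (ns.flatMap (fun n => pvLook d n))).filter
          (fun g => pvKey d ns g == c) := by
  obtain ⟨c0, rest, rfl⟩ : ∃ c0 rest, c = c0 :: rest := by
    cases c with
    | nil => exact absurd rfl hne
    | cons a t => exact ⟨a, t, rfl⟩
  have hc0 : c0 ∈ ns := hsub.subset (List.mem_cons_self ..)
  -- (1) A's value is one filter over pvLook d c0
  have hA : pvComboValue d ns (c0 :: rest)
      = (pvLook d c0).filter (fun g =>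
          (rest.map (pvLook d)).all (fun s => s.contains g)
          && !(((ns.filter (fun n => !(c0 :: rest).contains n)).map (pvLook d)).any
                (fun s => s.contains g))) := by
    rw [pvComboValue]
    rw [pv_fold_inter, PySem.Set.diff, List.filter_filter]
    apply List.filter_congr
    intro g hg
    rw [pv_fold_union_contains]
    rw [show PySem.Set.contains PySem.Set.empty g = false from rfl, Bool.false_or, Bool.and_comm]
  rw [hA]
  -- (2) pointwise, A's test is the membership-tuple test, on pvLook d c0
  have hpt : ∀ g, g ∈ pvLook d c0 →
      ((rest.map (pvLook d)).all (fun s => s.contains g)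
        && !(((ns.filter (fun n => !(c0 :: rest).contains n)).map (pvLook d)).any
              (fun s => s.contains g)))
      = (pvKey d ns g == c0 :: rest) := by
    intro g hg
    rcases Bool.eq_false_or_eq_true (pvKey d ns g == c0 :: rest) with hb | hb
    · -- key matches: both conjuncts hold
      have hkey : ∀ n ∈ ns, (g ∈ pvLook d n ↔ n ∈ c0 :: rest) :=
        (pv_key_eq_iff d ns g _ hn hsub).mp (by simpa using hb)
      rw [hb]
      apply Bool.and_eq_true_iff.mpr
      constructor
      · rw [List.all_eq_true]
        intro s hs
        rcases List.mem_map.mp hs with ⟨n, hnr, rfl⟩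
        exact (PySem.Set.contains_iff _ g).mpr
          ((hkey n (hsub.subset (List.mem_cons_of_mem _ hnr))).mpr (List.mem_cons_of_mem _ hnr))
      · rw [Bool.not_eq_true', Bool.eq_false_iff]
        intro hany
        rcases List.any_eq_true.mp hany with ⟨s, hs, hcon⟩
        rcases List.mem_map.mp hs with ⟨n, hnf, rfl⟩
        rcases List.mem_filter.mp hnf with ⟨hnns, hnotc⟩
        have : n ∈ c0 :: rest := (hkey n hnns).mp ((PySem.Set.contains_iff _ g).mp hcon)
        simp [this] at hnotc
    · -- key does not match: some conjunct fails
      rw [hb]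
      apply Bool.eq_false_iff.mpr
      intro htr
      rcases Bool.and_eq_true_iff.mp htr with ⟨hall, hnone⟩
      have hkey : ∀ n ∈ ns, (g ∈ pvLook d n ↔ n ∈ c0 :: rest) := by
        intro n hnns
        constructor
        · intro hgn
          by_contra hnc
          have : n ∈ ns.filter (fun n => !(c0 :: rest).contains n) :=
            List.mem_filter.mpr ⟨hnns, by simpa using hnc⟩
          have : ((ns.filter (fun n => !(c0 :: rest).contains n)).map (pvLook d)).any
              (fun s => s.contains g) = true :=
            List.any_eq_true.mpr ⟨pvLook d n, List.mem_map.mpr ⟨n, this, rfl⟩,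
              (PySem.Set.contains_iff _ g).mpr hgn⟩
          rw [this] at hnone
          exact absurd hnone (by decide)
        · intro hnc
          rcases List.mem_cons.mp hnc with rfl | hnr
          · exact hg
          · exact (PySem.Set.contains_iff _ g).mp
              (List.all_eq_true.mp hall _ (List.mem_map.mpr ⟨n, hnr, rfl⟩))
      have := (pv_key_eq_iff d ns g _ hn hsub).mpr hkey
      rw [show (pvKey d ns g == c0 :: rest) = true by simpa using this] at hb
      exact absurd hb (by decide)
  rw [List.filter_congr (fun g hg => hpt g hg)]
  -- (3) move the filter onto the deduplicated gene stream
  rcases pv_sublist_decomp c0 rest ns hn hsub with ⟨l1, l2, rfl, hrl, hl1⟩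
  rw [pv_bucket_eq d l1 l2 c0 _ ?_ ?_]
  · intro g hQ
    have hkey := (pv_key_eq_iff d _ g _ hn hsub).mp (by simpa using hQ)
    exact (hkey c0 hc0).mpr (List.mem_cons_self ..)
  · intro g hQ n hnl1 hgn
    have hkey := (pv_key_eq_iff d _ g _ hn hsub).mp (by simpa using hQ)
    exact hl1 n hnl1 ((hkey n (by simp [List.mem_append.mpr (Or.inl hnl1)])).mp hgn)

theorem pv_ports_eq (gene_sets : List (String × List String)) :
    get_gene_subsets gene_sets = get_gene_subsets_alt gene_sets := by
  rw [get_gene_subsets, get_gene_subsets_alt]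
  set d := PySem.Dict.ofList gene_sets with hd
  set ns := d.keys with hns
  have hnd : ns.Nodup := PySem.Dict.nodup_keys_ofList gene_sets
  -- both combination folds become one fold over pvAllCombos
  rw [pv_doubleFold ns (fun subs combo => subs.insert combo (pvComboValue d ns combo)) PySem.Dict.empty]
  rw [pv_doubleFold ns (fun subs combo => subs.insert combo ([] : List String)) PySem.Dict.empty]
  set I0 := (pvAllCombos ns).foldl (fun subs combo => subs.insert combo ([] : List String)) PySem.Dict.empty with hI0
  rw [pv_items_combo_fold ns hnd (pvComboValue d ns)]
  -- B: flatten the gene loop and drop the (empty) seen set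
  rw [← List.foldl_flatMap (f := fun name => pvLook d name) (g := pvGeneStep d ns)]
  rw [pv_pair_fold d ns _ I0 PySem.Set.empty]
  rw [show (List.filter (fun g => !PySem.Set.contains PySem.Set.empty g)
      (PySem.Set.ofList (ns.flatMap fun name => pvLook d name)))
      = PySem.Set.ofList (ns.flatMap fun name => pvLook d name) from List.filter_true _]
  set G := PySem.Set.ofList (ns.flatMap fun name => pvLook d name) with hG
  set F := G.foldl (fun subs g => subs.modify (pvKey d ns g) [] fun s => PySem.Set.add s g) I0 with hF
  -- I0's items and keys
  have hI0items : I0.items = (pvAllCombos ns).map (fun c => (c, ([] : List String))) :=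
    pv_items_combo_fold ns hnd _
  have hI0keys : I0.keys = pvAllCombos ns := by
    rw [PySem.Dict.keys, hI0items, List.map_map]
    rw [show ((fun x : List String × List String => x.1) ∘ fun c : List String => (c, ([] : List String))) = id from rfl, List.map_id]
  -- F's keys are exactly the combination keys
  have hFkeys : F.keys = pvAllCombos ns := by
    rw [hF, PySem.Dict.keys_foldl_modify_key G (pvKey d ns) [] (fun _ g s => PySem.Set.add s g) I0]
    rw [hI0keys, PySem.Set.update_eq_append_filter]
    rw [show List.filter (fun y => !PySem.Set.contains (pvAllCombos ns) y) (PySem.Set.ofList (G.map (pvKey d ns))) = [] from ?_, List.append_nil]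
    rw [List.filter_eq_nil_iff]
    intro k hk hcon
    rcases List.mem_map.mp ((PySem.Set.mem_ofList _ k).mp hk) with ⟨g, hgG, rfl⟩
    have hkmem : pvKey d ns g ∈ pvAllCombos ns := by
      rw [pv_mem_allCombos]
      constructor
      · rw [pvKey]; exact List.filter_sublist
      · rcases List.mem_flatMap.mp ((PySem.Set.mem_ofList _ g).mp (hG ▸ hgG)) with ⟨n, hnns, hgn⟩
        intro hemp
        have : n ∈ pvKey d ns g := by
          rw [pvKey]
          exact List.mem_filter.mpr ⟨hnns, (PySem.Set.contains_iff _ g).mpr hgn⟩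
        rw [hemp] at this
        cases this
    rw [(PySem.Set.contains_iff _ _).mpr hkmem] at hcon
    exact absurd hcon (by decide)
  have hFnodup : F.keys.Nodup := by rw [hFkeys]; exact pv_allCombos_nodup ns hnd
  -- F's items, value by value
  rw [PySem.Dict.items_eq_map_keys F hFnodup [], hFkeys]
  apply List.map_congr_left
  intro c hc
  rcases (pv_mem_allCombos ns c).mp hc with ⟨hsub, hne⟩
  have hGnodup : G.Nodup := PySem.Set.nodup_ofList _
  have hfresh : ∀ g ∈ G, g ∉ I0.getD (pvKey d ns g) [] := by
    intro g _
    rw [pv_init_getD ns hnd]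
    exact List.not_mem_nil
  rw [hF, pv_getD_fold (pvKey d ns) G I0 c hGnodup hfresh, pv_init_getD ns hnd, List.nil_append]
  rw [pv_combo_value_eq d ns hnd c hsub hne]

-- ===== VERDICT (by name: the statement is the Claim_ definition above) =====
theorem get_gene_subsets_spec : Claim_equal_get_gene_subsets := by
  intro gene_sets _
  unfold Spec_get_gene_subsets
  exact pv_ports_eq gene_sets
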